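-- pv_equiv track=rewrite | github.com/postman721/RunIT-QT_QWebengine | adblocker.py | _host_in
-- ===== SOURCE A (Python) =====
-- def _host_in(blocked: set[str], host: str) -> bool:
--     """
--     Return True if 'host' or any of its parent domains is in 'blocked'.
--     Example: ads.example.com -> checks ads.example.com, example.com, com.
--     """
--     h = (host or "").lower().strip(".")
--     if not h:
--         return False
--     while True:
--         if h in blocked:
--             return True
--         i = h.find(".")
--         if i == -1:
--             break
--         h = h[i + 1 :]
--     return False
-- ===== SOURCE B (Python) =====
-- def _host_in(blocked: set[str], host: str) -> bool:
--     """
--     Return True if 'host' or any of its parent domains is in 'blocked'.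
--     Iterates over the blocked set instead of over the host's suffixes:
--     an entry b blocks h exactly when h == b or h ends with '.' + b.
--     """
--     h = (host or "").lower().strip(".")
--     if not h:
--         return False
--     return any(h == b or h.endswith("." + b) for b in blocked)
-- ===== Notes on version B (the rewrite author's own statement) =====
-- stated objective: alternative
-- what changed: Instead of A's loop generating each dot-suffix of the host and testing set membership, B iterates over the blocked entries themselves and tests each entry b directly against the host with h == b or h.endswith('.' + b); the result is a boolean any, so the set's iteration order cannot matter.
import Mathlib
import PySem

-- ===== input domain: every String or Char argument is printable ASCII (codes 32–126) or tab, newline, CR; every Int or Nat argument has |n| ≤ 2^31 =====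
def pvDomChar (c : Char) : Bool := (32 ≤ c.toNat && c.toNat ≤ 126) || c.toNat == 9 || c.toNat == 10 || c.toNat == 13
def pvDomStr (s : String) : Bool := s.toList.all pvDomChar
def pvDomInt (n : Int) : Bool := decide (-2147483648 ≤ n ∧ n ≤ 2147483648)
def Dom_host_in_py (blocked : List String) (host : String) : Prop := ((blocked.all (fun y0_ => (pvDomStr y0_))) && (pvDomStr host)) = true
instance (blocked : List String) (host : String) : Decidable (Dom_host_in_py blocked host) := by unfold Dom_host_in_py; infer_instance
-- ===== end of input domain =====

-- B iterates over the blocked entries and tests each one directly against the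
-- host (h == b or h.endswith('.' + b)), instead of A's loop generating each
-- dot-suffix of the host and testing set membership (objective: alternative).

-- ===== PORT A =====
-- A's 'while True' loop over the shrinking string h, on its code points
def hostInPyGo (blocked : List String) (h : List Char) : Bool :=
  if PySem.Set.contains blocked (String.ofList h) then true
  else if PySem.Chars.find h ['.'] = -1 then false
  else hostInPyGo blocked (PySem.Chars.slice h (some (PySem.Chars.find h ['.'] + 1)) none)
termination_by h.length
decreasing_by
  have h0 : 0 ≤ PySem.Chars.find h ['.'] := by
    have := PySem.Chars.neg_one_le_find h ['.']
    omega
  have hinf : ['.'] <:+: h := (PySem.Chars.find_nonneg_iff h ['.']).mp h0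
  have hne : h ≠ [] := by
    rintro rfl
    simpa using hinf.length_le
  have h1 : 0 ≤ PySem.Chars.find h ['.'] + 1 := by omega
  simp only [PySem.Chars.slice_eq_listSlice, PySem.List.slice_from _ h1, List.length_drop]
  have : 0 < h.length := List.length_pos_iff.mpr hne
  omega

def host_in_py (blocked : List String) (host : String) : Bool :=
  let h := PySem.Str.stripChars (PySem.Str.lower (if host == "" then "" else host)) "."
  if h == "" then false
  else hostInPyGo blocked h.toList

-- ===== PORT B =====
def host_in_py_alt (blocked : List String) (host : String) : Bool :=
  let h := PySem.Str.stripChars (PySem.Str.lower (if host == "" then "" else host)) "."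
  if h == "" then false
  else blocked.any (fun b => h == b || PySem.Str.endswith h ("." ++ b))

-- ===== PRECONDITION & SPEC =====
def Spec_host_in_py (blocked : List String) (host : String) (out : Bool) : Prop := out = host_in_py_alt blocked host
instance (blocked : List String) (host : String) (out : Bool) : Decidable (Spec_host_in_py blocked host out) := by unfold Spec_host_in_py; infer_instance

-- ===== CLAIM (what is proved, stated in full; the proofs are below) =====
def Claim_equal_host_in_py : Prop := ∀ (blocked : List String) (host : String), Dom_host_in_py blocked host → Spec_host_in_py blocked host (host_in_py blocked host)

-- ===== LEMMAS AND PROOFS =====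

-- the suffixes of cs that start right after a '.'
def sfx (cs : List Char) : List (List Char) :=
  match cs with
  | [] => []
  | c :: rest => if c = '.' then rest :: sfx rest else sfx rest

theorem sfx_of_no_dot (cs : List Char) (h : ∀ c ∈ cs, c ≠ '.') : sfx cs = [] := by
  induction cs with
  | nil => rfl
  | cons c rest ih =>
    simp only [sfx, if_neg (h c (by simp))]
    exact ih (fun x hx => h x (by simp [hx]))

theorem sfx_append_dot (pre rest : List Char) (h : ∀ c ∈ pre, c ≠ '.') :
    sfx (pre ++ '.' :: rest) = rest :: sfx rest := by
  induction pre with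
  | nil => simp [sfx]
  | cons c pre ih =>
    simp only [List.cons_append, sfx, if_neg (h c (by simp))]
    exact ih (fun x hx => h x (by simp [hx]))

-- A's loop checks exactly cs and the suffixes after each dot
theorem hostInPyGo_eq_sfx (blocked : List String) (cs : List Char) :
    hostInPyGo blocked cs =
      (PySem.Set.contains blocked (String.ofList cs) ||
        (sfx cs).any (fun t => PySem.Set.contains blocked (String.ofList t))) := by
  induction cs using hostInPyGo.induct blocked with
  | case1 cs hmem => rw [hostInPyGo, if_pos hmem, hmem, Bool.true_or]
  | case2 cs hmem hi =>
    have hnin : ¬ ['.'] <:+: cs := (PySem.Chars.find_eq_neg_one_iff cs ['.']).mp hi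
    have hno : ∀ c ∈ cs, c ≠ '.' := by
      intro c hc hce
      exact hnin ((List.singleton_infix_iff '.' cs).mpr (hce ▸ hc))
    rw [hostInPyGo, if_neg hmem, if_pos hi, sfx_of_no_dot cs hno]
    simp only [List.any_nil, Bool.or_false]
    exact (Bool.eq_false_iff.mpr hmem).symm
  | case3 cs hmem hi ih =>
    have h0 : 0 ≤ PySem.Chars.find cs ['.'] := by
      have := PySem.Chars.neg_one_le_find cs ['.']
      omega
    obtain ⟨hpre, hmin⟩ := PySem.Chars.find_spec h0
    set n : Nat := (PySem.Chars.find cs ['.']).toNat with hn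
    have hnlen : n < cs.length := by
      have hinf : ['.'] <:+: cs := (PySem.Chars.find_nonneg_iff cs ['.']).mp h0
      have hne : cs ≠ [] := by rintro rfl; simpa using hinf.length_le
      by_contra hge
      rw [List.drop_eq_nil_of_le (by omega)] at hpre
      simpa using hpre.length_le
    have hget : cs[n]? = some '.' := by
      rw [List.drop_eq_getElem_cons hnlen] at hpre
      obtain ⟨t, ht⟩ := hpre
      have := congrArg (·.head?) ht
      simpa [List.getElem?_eq_getElem hnlen] using this.symm
    have hgetE : cs[n] = '.' := by
      have := List.getElem?_eq_getElem hnlen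
      rw [hget] at this
      exact (Option.some.inj this).symm
    have hdecomp : cs = cs.take n ++ '.' :: cs.drop (n + 1) := by
      conv_lhs => rw [← List.take_append_drop n cs]
      rw [List.drop_eq_getElem_cons hnlen, hgetE]
    have hpreno : ∀ c ∈ cs.take n, c ≠ '.' := by
      intro c hc hce
      obtain ⟨k, hk, hck⟩ := List.mem_iff_getElem.mp hc
      have hkn : k < n := by
        have := hk
        simp only [List.length_take] at this
        omega
      apply hmin k hkn
      rw [List.drop_eq_getElem_cons (by omega : k < cs.length)]
      have hck' : cs[k] = '.' := by
        rw [← hce, ← hck]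
        simp [List.getElem_take]
      rw [hck']
      exact ⟨cs.drop (k + 1), rfl⟩
    have hslice : PySem.Chars.slice cs (some (PySem.Chars.find cs ['.'] + 1)) none = cs.drop (n + 1) := by
      have h1 : (0:Int) ≤ PySem.Chars.find cs ['.'] + 1 := by omega
      simp only [PySem.Chars.slice_eq_listSlice, PySem.List.slice_from _ h1]
      congr 1
      omega
    rw [hslice] at ih
    rw [hostInPyGo, if_neg hmem, if_neg hi, hslice, ih]
    conv_rhs => rw [hdecomp, sfx_append_dot _ _ hpreno, ← hdecomp]
    have hcf : PySem.Set.contains blocked (String.ofList cs) = false := Bool.eq_false_iff.mpr hmem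
    rw [List.any_cons, hcf, Bool.false_or]

-- t is a suffix after some dot exactly when '.' :: t is a suffix of cs
theorem mem_sfx_iff (cs t : List Char) : t ∈ sfx cs ↔ ('.' :: t) <:+ cs := by
  induction cs with
  | nil => simp [sfx]
  | cons c rest ih =>
    by_cases hc : c = '.'
    · subst hc
      rw [show sfx ('.' :: rest) = rest :: sfx rest from by simp [sfx]]
      simp only [List.mem_cons, ih, List.suffix_cons_iff, List.cons.injEq, true_and]
    · simp only [sfx, if_neg hc, ih, List.suffix_cons_iff, List.cons.injEq]
      tauto

-- ===== VERDICT (by name: the statement is the Claim_ definition above) =====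
theorem host_in_py_spec : Claim_equal_host_in_py := by
  unfold Claim_equal_host_in_py Spec_host_in_py
  intro blocked host _
  unfold host_in_py host_in_py_alt
  generalize PySem.Str.stripChars (PySem.Str.lower (if host == "" then "" else host)) "." = h
  by_cases he : h == ""
  · simp only [he, if_pos]
  · simp only [he, Bool.false_eq_true, reduceIte]
    rw [hostInPyGo_eq_sfx]
    apply Bool.eq_iff_iff.mpr
    simp only [Bool.or_eq_true, List.any_eq_true, PySem.Set.contains_iff,
      PySem.Str.endswith_eq, PySem.Chars.endswith_iff, beq_iff_eq]
    have htl : ∀ b : String, ("." ++ b).toList = '.' :: b.toList := by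
      intro b
      simp [String.toList_append]
    constructor
    · rintro (hm | ⟨t, ht, hm⟩)
      · refine ⟨String.ofList h.toList, hm, Or.inl ?_⟩
        exact (String.toList_injective (by simp)).symm
      · refine ⟨String.ofList t, hm, Or.inr ?_⟩
        rw [htl]
        simpa [(mem_sfx_iff h.toList t).symm] using ht
    · rintro ⟨b, hb, heq | hsuf⟩
      · left
        have hob : String.ofList h.toList = h := String.toList_injective (by simp)
        rw [hob, heq]
        exact hb
      · right
        rw [htl] at hsuf
        refine ⟨b.toList, (mem_sfx_iff h.toList b.toList).mpr hsuf, ?_⟩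
        have hob : String.ofList b.toList = b := String.toList_injective (by simp)
        rwa [hob]
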